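-- pv_equiv track=rewrite | github.com/derekgwatson/buz_app | app/routes/excel_tools.py | _compress_indices_to_descending_ranges
-- ===== SOURCE A (Python) =====
-- from typing import Iterable, List, Tuple, Dict, Any
--
-- def _compress_indices_to_descending_ranges(indices: List[int]) -> List[Tuple[int, int]]:
--     """Convert row indices to bottom-up (start, count) ranges for delete_rows."""
--     if not indices:
--         return []
--     dedup_sorted = sorted(set(indices))
--     ranges: List[Tuple[int, int]] = []
--     start = prev = dedup_sorted[0]
--     for i in dedup_sorted[1:]:
--         if i == prev + 1:
--             prev = i
--         else:
--             ranges.append((start, prev))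
--             start = prev = i
--     ranges.append((start, prev))
--     return [(s, e - s + 1) for (s, e) in reversed(ranges)]
-- ===== SOURCE B (Python) =====
-- def _compress_indices_to_descending_ranges(indices):
--     """Convert row indices to bottom-up (start, count) ranges for delete_rows.
--
--     Boundary-detection instead of a grouping scan: in the set of indices, a
--     value starts a run exactly when value-1 is absent, and ends a run exactly
--     when value+1 is absent.  Sorting the run-starts and run-ends separately
--     pairs the k-th smallest start with the k-th smallest end, giving each run
--     as (start, end) without ever walking adjacent elements.
--     """
--     s = set(indices)
--     starts = sorted(x for x in s if x - 1 not in s)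
--     ends = sorted(x for x in s if x + 1 not in s)
--     return list(reversed([(a, b - a + 1) for a, b in zip(starts, ends)]))
-- ===== Notes on version B (the rewrite author's own statement) =====
-- stated objective: alternative
-- what changed: B replaces A's sequential grouping scan (walking sorted distinct indices while tracking start/prev state) with set-boundary detection: a value is a run start iff value-1 is not in the set and a run end iff value+1 is not, so the starts and ends are computed independently by membership filters and paired positionally after sorting.
import Mathlib
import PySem

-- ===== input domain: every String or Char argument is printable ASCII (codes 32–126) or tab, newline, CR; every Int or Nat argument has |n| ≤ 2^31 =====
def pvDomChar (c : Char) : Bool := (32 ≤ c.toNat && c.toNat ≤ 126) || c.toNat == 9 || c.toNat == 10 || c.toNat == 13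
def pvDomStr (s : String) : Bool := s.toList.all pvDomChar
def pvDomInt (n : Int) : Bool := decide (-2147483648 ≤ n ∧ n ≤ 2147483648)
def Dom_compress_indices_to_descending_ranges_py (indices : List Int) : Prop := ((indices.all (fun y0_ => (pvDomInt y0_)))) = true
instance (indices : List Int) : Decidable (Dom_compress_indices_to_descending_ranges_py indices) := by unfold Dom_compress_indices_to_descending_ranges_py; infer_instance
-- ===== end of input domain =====

-- B detects run boundaries by set membership (x-1 / x+1 absent) and pairs sorted starts with sorted ends, instead of A's stateful grouping scan; alternative algorithm, same cost.

-- ===== PORT A =====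
-- the 'for i in dedup_sorted[1:]' loop with state (ranges, start, prev); base case is the trailing ranges.append((start, prev))
def pvLoopA : List Int → List (Int × Int) → Int → Int → List (Int × Int)
  | [], ranges, start, prev => ranges ++ [(start, prev)]
  | i :: rest, ranges, start, prev =>
    if i = prev + 1 then pvLoopA rest ranges start i
    else pvLoopA rest (ranges ++ [(start, prev)]) i i

def compress_indices_to_descending_ranges_py (indices : List Int) : List (Int × Int) :=
  if indices = [] then []
  else
    match PySem.List.sorted (PySem.Set.ofList indices) (fun x => x) false with
    | [] => []
    | x :: rest =>
      ((pvLoopA rest [] x x).reverse).map (fun p => (p.1, p.2 - p.1 + 1))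

-- ===== PORT B =====
def compress_indices_to_descending_ranges_py_alt (indices : List Int) : List (Int × Int) :=
  let s : PySem.Set Int := PySem.Set.ofList indices
  let starts := PySem.List.sorted (s.filter (fun x => !(PySem.Set.contains s (x - 1)))) (fun x => x) false
  let ends := PySem.List.sorted (s.filter (fun x => !(PySem.Set.contains s (x + 1)))) (fun x => x) false
  (((List.zip starts ends).map (fun p => (p.1, p.2 - p.1 + 1)))).reverse

-- ===== PRECONDITION & SPEC =====
def Spec_compress_indices_to_descending_ranges_py (indices : List Int) (out : List (Int × Int)) : Prop := out = compress_indices_to_descending_ranges_py_alt indices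
instance (indices : List Int) (out : List (Int × Int)) : Decidable (Spec_compress_indices_to_descending_ranges_py indices out) := by unfold Spec_compress_indices_to_descending_ranges_py; infer_instance

-- ===== CLAIM (what is proved, stated in full; the proofs are below) =====
def Claim_equal_compress_indices_to_descending_ranges_py : Prop := ∀ (indices : List Int), Dom_compress_indices_to_descending_ranges_py indices → Spec_compress_indices_to_descending_ranges_py indices (compress_indices_to_descending_ranges_py indices)

-- ===== LEMMAS AND PROOFS =====

-- A's loop without the accumulator
def pvRanges (start prev : Int) : List Int → List (Int × Int)
  | [] => [(start, prev)]
  | i :: rest => if i = prev + 1 then pvRanges start i rest else (start, prev) :: pvRanges i i rest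

theorem pvLoopA_eq (l : List Int) : ∀ (ranges : List (Int × Int)) (start prev : Int),
    pvLoopA l ranges start prev = ranges ++ pvRanges start prev l := by
  induction l with
  | nil => intro ranges start prev; rfl
  | cons i rest ih =>
    intro ranges start prev
    simp only [pvLoopA, pvRanges]
    by_cases h : i = prev + 1
    · simp [h, ih]
    · simp [h, ih]

-- run starts among the non-head elements, read off the adjacent-difference structure
def pvStartsOf (prev : Int) : List Int → List Int
  | [] => []
  | i :: rest => if i = prev + 1 then pvStartsOf i rest else i :: pvStartsOf i rest

-- run ends, read off the adjacent-difference structure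
def pvEndsOf (prev : Int) : List Int → List Int
  | [] => [prev]
  | i :: rest => if i = prev + 1 then pvEndsOf i rest else prev :: pvEndsOf i rest

theorem pvRanges_fst (l : List Int) : ∀ (s p : Int),
    (pvRanges s p l).map Prod.fst = s :: pvStartsOf p l := by
  induction l with
  | nil => intro s p; rfl
  | cons i rest ih =>
    intro s p
    simp only [pvRanges, pvStartsOf]
    by_cases h : i = p + 1 <;> simp [h, ih]

theorem pvRanges_snd (l : List Int) : ∀ (s p : Int),
    (pvRanges s p l).map Prod.snd = pvEndsOf p l := by
  induction l with
  | nil => intro s p; rfl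
  | cons i rest ih =>
    intro s p
    simp only [pvRanges, pvEndsOf]
    by_cases h : i = p + 1 <;> simp [h, ih]

-- B's port with the let-bindings unfolded (definitional)
theorem pvAlt_eq (indices : List Int) :
    compress_indices_to_descending_ranges_py_alt indices =
      ((List.zip
          (PySem.List.sorted ((PySem.Set.ofList indices).filter
            (fun x => !(PySem.Set.contains (PySem.Set.ofList indices) (x - 1)))) (fun x => x) false)
          (PySem.List.sorted ((PySem.Set.ofList indices).filter
            (fun x => !(PySem.Set.contains (PySem.Set.ofList indices) (x + 1)))) (fun x => x) false)).map
        (fun p => (p.1, p.2 - p.1 + 1))).reverse := rfl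

-- in a strictly increasing list p :: l, the elements of l whose predecessor is absent are exactly the run starts
theorem pvFilter_starts (l : List Int) : ∀ (p : Int), (p :: l).Pairwise (· < ·) →
    l.filter (fun v => decide ((v - 1) ∉ (p :: l))) = pvStartsOf p l := by
  induction l with
  | nil => intro p _; rfl
  | cons i rest ih =>
    intro p hpw
    have hpi : p < i := (List.pairwise_cons.mp hpw).1 i (by simp)
    have hrest : ∀ y ∈ rest, i < y :=
      (List.pairwise_cons.mp (List.pairwise_cons.mp hpw).2).1
    have htail : (i :: rest).Pairwise (· < ·) := (List.pairwise_cons.mp hpw).2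
    have hmem : ((i - 1) ∈ (p :: i :: rest)) ↔ i = p + 1 := by
      simp only [List.mem_cons]
      constructor
      · rintro (h | h | h)
        · omega
        · omega
        · have := hrest _ h; omega
      · intro h; left; omega
    have hcongr : rest.filter (fun v => decide ((v - 1) ∉ (p :: i :: rest)))
        = rest.filter (fun v => decide ((v - 1) ∉ (i :: rest))) := by
      apply List.filter_congr
      intro v hv
      have hvi : i < v := hrest v hv
      simp only [decide_eq_decide, List.mem_cons]
      constructor
      · intro h hh; exact h (Or.inr hh)
      · intro h hh
        rcases hh with hh | hh
        · omega
        · exact h hh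
    simp only [pvStartsOf, List.filter_cons]
    by_cases h : i = p + 1
    · rw [if_pos h, if_neg (by simp [h]), hcongr]
      exact ih i htail
    · rw [if_neg h, if_pos (by simpa [hmem] using h), hcongr]
      rw [ih i htail]

-- in a strictly increasing list p :: l, the elements whose successor is absent are exactly the run ends
theorem pvFilter_ends (l : List Int) : ∀ (p : Int), (p :: l).Pairwise (· < ·) →
    (p :: l).filter (fun v => decide ((v + 1) ∉ (p :: l))) = pvEndsOf p l := by
  induction l with
  | nil =>
    intro p _
    simp [pvEndsOf]
  | cons i rest ih =>
    intro p hpw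
    have hpi : p < i := (List.pairwise_cons.mp hpw).1 i (by simp)
    have hrest : ∀ y ∈ rest, i < y :=
      (List.pairwise_cons.mp (List.pairwise_cons.mp hpw).2).1
    have htail : (i :: rest).Pairwise (· < ·) := (List.pairwise_cons.mp hpw).2
    have hmem : ((p + 1) ∈ (p :: i :: rest)) ↔ i = p + 1 := by
      simp only [List.mem_cons]
      constructor
      · rintro (h | h | h)
        · omega
        · omega
        · have := hrest _ h; omega
      · intro h; right; left; omega
    have hcongr : (i :: rest).filter (fun v => decide ((v + 1) ∉ (p :: i :: rest)))
        = (i :: rest).filter (fun v => decide ((v + 1) ∉ (i :: rest))) := by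
      apply List.filter_congr
      intro v hv
      have hvi : i ≤ v := by
        simp only [List.mem_cons] at hv
        rcases hv with hv | hv
        · omega
        · exact le_of_lt (hrest v hv)
      simp only [decide_eq_decide, List.mem_cons]
      constructor
      · intro h hh; exact h (Or.inr hh)
      · intro h hh
        rcases hh with hh | hh
        · omega
        · exact h hh
    rw [List.filter_cons]
    simp only [pvEndsOf]
    by_cases h : i = p + 1
    · rw [if_neg (by simp [h]), if_pos h, hcongr]
      exact ih i htail
    · rw [if_pos (by simpa [hmem] using h), if_neg h, hcongr]
      rw [ih i htail]

-- ===== VERDICT (by name: the statement is the Claim_ definition above) =====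
theorem compress_indices_to_descending_ranges_py_spec : Claim_equal_compress_indices_to_descending_ranges_py := by
  intro indices _
  unfold Spec_compress_indices_to_descending_ranges_py
  rw [pvAlt_eq]
  unfold compress_indices_to_descending_ranges_py
  by_cases hnil : indices = []
  · subst hnil; rfl
  · rw [if_neg hnil]
    have hd := PySem.List.sorted_ofList_pairwise_lt (xs := indices) (κ := Int)
    -- sorting the filtered set = filtering the sorted set
    have hsf : ∀ (p : Int → Bool),
        PySem.List.sorted ((PySem.Set.ofList indices).filter p) (fun x => x) false
          = (PySem.List.sorted (PySem.Set.ofList indices) (fun x => x) false).filter p := by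
      intro p
      apply PySem.List.sorted_eq_of_perm_of_pairwise_lt
      · exact List.Perm.filter p (PySem.List.sorted_perm _ _ _)
      · exact List.Pairwise.sublist List.filter_sublist hd
    rw [hsf, hsf]
    -- rewrite the set-contains predicates into membership in the sorted list
    have hpred : ∀ (c : Int) (v : Int),
        (!(PySem.Set.contains (PySem.Set.ofList indices) (v + c)))
          = decide ((v + c) ∉ PySem.List.sorted (PySem.Set.ofList indices) (fun x => x) false) := by
      intro c v
      simp [PySem.List.mem_sorted, decide_not]
    have hstarts : ∀ (D : List Int),
        D.filter (fun x => !(PySem.Set.contains (PySem.Set.ofList indices) (x - 1)))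
          = D.filter (fun v => decide ((v - 1) ∉ PySem.List.sorted (PySem.Set.ofList indices) (fun x => x) false)) := by
      intro D
      apply List.filter_congr
      intro v _
      simpa using hpred (-1) v
    have hends : ∀ (D : List Int),
        D.filter (fun x => !(PySem.Set.contains (PySem.Set.ofList indices) (x + 1)))
          = D.filter (fun v => decide ((v + 1) ∉ PySem.List.sorted (PySem.Set.ofList indices) (fun x => x) false)) := by
      intro D
      apply List.filter_congr
      intro v _
      exact hpred 1 v
    rw [hstarts, hends]
    cases hdc : PySem.List.sorted (PySem.Set.ofList indices) (fun x => x) false with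
    | nil => simp
    | cons x rest =>
      rw [hdc] at hd
      have hxmin : ∀ y ∈ rest, x < y := (List.pairwise_cons.mp hd).1
      have hxpass : ((x - 1) ∉ (x :: rest)) := by
        simp only [List.mem_cons]
        rintro (h | h)
        · omega
        · have := hxmin _ h; omega
      rw [List.filter_cons, if_pos (by simp [hxpass])]
      rw [pvFilter_starts rest x hd, pvFilter_ends rest x hd]
      have hred : (match x :: rest with
          | [] => ([] : List (Int × Int))
          | x :: rest => List.map (fun p => (p.1, p.2 - p.1 + 1)) (pvLoopA rest [] x x).reverse)
          = List.map (fun p => (p.1, p.2 - p.1 + 1)) (pvLoopA rest [] x x).reverse := rfl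
      rw [hred, pvLoopA_eq, List.nil_append]
      rw [← pvRanges_fst rest x x, ← pvRanges_snd rest x x]
      rw [show (((pvRanges x x rest).map Prod.fst).zip ((pvRanges x x rest).map Prod.snd))
            = pvRanges x x rest from (List.zip_of_prod rfl rfl).symm]
      rw [List.map_reverse]
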